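-- pv_equiv track=rewrite | github.com/Staphir/GeometrieDiscrete_cercleSphere | cercle_brute_force.py | completeCircle
-- ===== SOURCE A (Python) =====
-- def completeCircle(octant_est_sud, circle_ray):
--     octant_sud_est = []
--     octant_sud_est.append(octant_est_sud[0])
--
--     for coord in octant_est_sud:
--         new_coord = (coord[1], coord[0])
--         octant_sud_est.append(new_coord)
--
--     quart_sud_est = octant_est_sud + octant_sud_est
--
--     # -----------------------------
--
--     pos_center = (quart_sud_est[0][0] - circle_ray, quart_sud_est[0][1] - circle_ray)
--
--     quart_sud_ouest = []
--
--     for coord in quart_sud_est: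
--         new_coord = (coord[0] - (coord[0] - pos_center[0]) * 2, coord[1])
--         quart_sud_ouest.append(new_coord)
--
--     # -----------------------------
--
--     quart_nord_est = []
--
--     for coord in quart_sud_ouest:
--         new_coord = (coord[1] , coord[0])
--         quart_nord_est.append(new_coord)
--
--     # -----------------------------
--
--     quart_nord_ouest = []
--
--     for coord in quart_nord_est:
--         new_coord = (coord[0] - (coord[0] - pos_center[0]) * 2, coord[1])
--         quart_nord_ouest.append(new_coord)
--
--     # -----------------------------
--
--     return  quart_sud_est + quart_sud_ouest + quart_nord_est + quart_nord_ouest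
-- ===== SOURCE B (Python) =====
-- def completeCircle(octant_est_sud, circle_ray):
--     head = octant_est_sud[0]
--     # south-east quarter: the octant plus its diagonal mirror (duplicated head kept)
--     quart_sud_est = octant_est_sud + [head] + [(y, x) for (x, y) in octant_est_sud]
--     t = 2 * (head[0] - circle_ray)
--     # the four quarters are the orbit of quart_sud_est under a table of affine
--     # symmetries of the circle: (a, b, e, c, d, f) encodes (x, y) -> (a*x+b*y+e, c*x+d*y+f)
--     symmetries = [
--         (1, 0, 0, 0, 1, 0),    # identity        -> south-east
--         (-1, 0, t, 0, 1, 0),   # vertical mirror -> south-west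
--         (0, 1, 0, -1, 0, t),   # quarter turn    -> north-east
--         (0, -1, t, -1, 0, t),  # point symmetry  -> north-west
--     ]
--     return [(a * x + b * y + e, c * x + d * y + f)
--             for (a, b, e, c, d, f) in symmetries
--             for (x, y) in quart_sud_est]
-- ===== Notes on version B (the rewrite author's own statement) =====
-- stated objective: alternative
-- what changed: Replaces A's chained per-quarter loops (reflect, then swap the reflected list, then reflect again) by a table-driven orbit computation: a list of four affine symmetry matrices of the circle applied uniformly to quart_sud_est by one generic nested comprehension.
import Mathlib
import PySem

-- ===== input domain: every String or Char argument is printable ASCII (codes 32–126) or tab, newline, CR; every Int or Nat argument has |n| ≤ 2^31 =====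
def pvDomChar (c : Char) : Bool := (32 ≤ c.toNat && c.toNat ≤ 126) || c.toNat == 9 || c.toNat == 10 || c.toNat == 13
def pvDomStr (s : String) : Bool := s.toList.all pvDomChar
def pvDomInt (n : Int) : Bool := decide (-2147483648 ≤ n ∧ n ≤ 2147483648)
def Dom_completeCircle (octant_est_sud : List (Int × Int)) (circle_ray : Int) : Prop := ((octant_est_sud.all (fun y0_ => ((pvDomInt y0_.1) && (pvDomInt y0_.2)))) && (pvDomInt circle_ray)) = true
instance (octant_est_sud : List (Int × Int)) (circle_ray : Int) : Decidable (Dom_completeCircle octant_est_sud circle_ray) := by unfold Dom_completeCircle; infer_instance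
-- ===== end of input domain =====

-- B replaces A's chained per-quarter loops by applying a table of four affine symmetry
-- matrices uniformly to quart_sud_est (objective: alternative decomposition, same cost).

-- ===== PORT A =====
-- literal transliteration of A; octant_est_sud[0] raises IndexError on [], excluded by Pre_
def completeCircle (octant_est_sud : List (Int × Int)) (circle_ray : Int) : List (Int × Int) :=
  let h := (PySem.List.pyGet? octant_est_sud 0).getD (0, 0)
  let octant_sud_est := octant_est_sud.foldl (fun acc coord => acc ++ [(coord.2, coord.1)]) [h]
  let quart_sud_est := octant_est_sud ++ octant_sud_est
  let h0 := (PySem.List.pyGet? quart_sud_est 0).getD (0, 0)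
  let pos_center := (h0.1 - circle_ray, h0.2 - circle_ray)
  let quart_sud_ouest := quart_sud_est.foldl
    (fun acc coord => acc ++ [(coord.1 - (coord.1 - pos_center.1) * 2, coord.2)]) []
  let quart_nord_est := quart_sud_ouest.foldl (fun acc coord => acc ++ [(coord.2, coord.1)]) []
  let quart_nord_ouest := quart_nord_est.foldl
    (fun acc coord => acc ++ [(coord.1 - (coord.1 - pos_center.1) * 2, coord.2)]) []
  quart_sud_est ++ quart_sud_ouest ++ quart_nord_est ++ quart_nord_ouest

-- ===== PORT B =====
-- literal transliteration of Source B: a symmetry table flat-mapped over quart_sud_est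
def completeCircle_alt (octant_est_sud : List (Int × Int)) (circle_ray : Int) : List (Int × Int) :=
  let head := (PySem.List.pyGet? octant_est_sud 0).getD (0, 0)
  let quart_sud_est := octant_est_sud ++ [head] ++ octant_est_sud.map (fun p => (p.2, p.1))
  let t := 2 * (head.1 - circle_ray)
  let symmetries : List (Int × Int × Int × Int × Int × Int) :=
    [(1, 0, 0, 0, 1, 0), (-1, 0, t, 0, 1, 0), (0, 1, 0, -1, 0, t), (0, -1, t, -1, 0, t)]
  symmetries.flatMap (fun s => quart_sud_est.map (fun p =>
    (s.1 * p.1 + s.2.1 * p.2 + s.2.2.1, s.2.2.2.1 * p.1 + s.2.2.2.2.1 * p.2 + s.2.2.2.2.2)))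

-- ===== PRECONDITION & SPEC =====
-- A raises IndexError (octant_est_sud[0]) on the empty list; excluded.
def Pre_completeCircle (octant_est_sud : List (Int × Int)) (circle_ray : Int) : Prop :=
  octant_est_sud ≠ []
instance (octant_est_sud : List (Int × Int)) (circle_ray : Int) : Decidable (Pre_completeCircle octant_est_sud circle_ray) := by unfold Pre_completeCircle; infer_instance
def pvWitness_completeCircle : (List (Int × Int)) × Int := ([(5, 0), (5, 1), (4, 2)], 5)

def Spec_completeCircle (octant_est_sud : List (Int × Int)) (circle_ray : Int) (out : List (Int × Int)) : Prop := out = completeCircle_alt octant_est_sud circle_ray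
instance (octant_est_sud : List (Int × Int)) (circle_ray : Int) (out : List (Int × Int)) : Decidable (Spec_completeCircle octant_est_sud circle_ray out) := by unfold Spec_completeCircle; infer_instance

-- ===== CLAIM (what is proved, stated in full; the proofs are below) =====
def Claim_equal_completeCircle : Prop := ∀ (octant_est_sud : List (Int × Int)) (circle_ray : Int), Dom_completeCircle octant_est_sud circle_ray → Pre_completeCircle octant_est_sud circle_ray → Spec_completeCircle octant_est_sud circle_ray (completeCircle octant_est_sud circle_ray)

-- ===== LEMMAS AND PROOFS =====

theorem completeCircle_spec : Claim_equal_completeCircle := by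
  intro oes r _ hpre
  unfold Spec_completeCircle completeCircle completeCircle_alt
  obtain ⟨p0, tl, rfl⟩ := List.exists_cons_of_ne_nil hpre
  simp only [PySem.List.foldl_append_singleton_eq_map, PySem.List.pyGet?_zero_cons,
    Option.getD_some, List.flatMap_cons, List.flatMap_nil, List.nil_append, List.cons_append,
    List.map_map, Function.comp_def, List.append_assoc, List.append_nil]
  have e1 : (fun x : Int × Int => (x.1 - (x.1 - (p0.1 - r)) * 2, x.2))
      = (fun p : Int × Int => (-1 * p.1 + 0 * p.2 + 2 * (p0.1 - r), 0 * p.1 + 1 * p.2 + 0)) := by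
    funext x; simp only [Prod.mk.injEq]; constructor <;> ring
  have e2 : (fun x : Int × Int => (x.2, x.1 - (x.1 - (p0.1 - r)) * 2))
      = (fun p : Int × Int => (0 * p.1 + 1 * p.2 + 0, -1 * p.1 + 0 * p.2 + 2 * (p0.1 - r))) := by
    funext x; simp only [Prod.mk.injEq]; constructor <;> ring
  have e3 : (fun x : Int × Int => (x.2 - (x.2 - (p0.1 - r)) * 2, x.1 - (x.1 - (p0.1 - r)) * 2))
      = (fun p : Int × Int => (0 * p.1 + -1 * p.2 + 2 * (p0.1 - r), -1 * p.1 + 0 * p.2 + 2 * (p0.1 - r))) := by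
    funext x; simp only [Prod.mk.injEq]; constructor <;> ring
  have e0 : (fun p : Int × Int => ((1:Int) * p.1 + 0 * p.2 + 0, (0:Int) * p.1 + 1 * p.2 + 0)) = id := by
    funext x; simp
  rw [e1, e2, e3, e0, List.map_id]
  simp
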